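-- pv_equiv track=rewrite | github.com/marco507/CNC-Workpiece-Positioning | position.py | wangen_suchen
-- ===== SOURCE A (Python) =====
-- def wangen_suchen(input_gcode):
--     # Zeilen von Wangenkontur bis Ende (M00) aussortieren und in Liste - liste_wangen schreiben.
--     liste_wangen = []
--     wange = []
--     start = 0
--
--     for i in input_gcode:
--         if "(WANGENKONTOUR)" in i or "(AUFG AUSSENK)" in i:
--             start = 1
--
--         if start == 1:
--             wange.append(i)
--
--         if "M00" in i:
--             if len(wange) != 0:
--                 liste_wangen.append(wange)
--             wange = []
--             start = 0
--
--     return(liste_wangen)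
-- ===== SOURCE B (Python) =====
-- def wangen_suchen(input_gcode):
--     # Two-phase: chunk into M00-terminated segments, then take each segment's
--     # suffix from its first contour marker.
--     segments = []
--     seg = []
--     for line in input_gcode:
--         seg.append(line)
--         if "M00" in line:
--             segments.append(seg)
--             seg = []
--     # trailing `seg` without M00 is discarded
--     result = []
--     for s in segments:
--         idx = next((k for k, l in enumerate(s)
--                     if "(WANGENKONTOUR)" in l or "(AUFG AUSSENK)" in l), None)
--         if idx is not None:
--             result.append(s[idx:])
--     return result
-- ===== Notes on version B (the rewrite author's own statement) =====
-- stated objective: alternative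
-- what changed: Replaces A's incremental flag-based single pass (start/wange state mutated per line) with a two-phase decomposition: first chunk the input into M00-terminated segments (discarding a trailing unterminated segment), then for each segment emit the suffix from its first contour-marker line, if any.
import Mathlib
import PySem

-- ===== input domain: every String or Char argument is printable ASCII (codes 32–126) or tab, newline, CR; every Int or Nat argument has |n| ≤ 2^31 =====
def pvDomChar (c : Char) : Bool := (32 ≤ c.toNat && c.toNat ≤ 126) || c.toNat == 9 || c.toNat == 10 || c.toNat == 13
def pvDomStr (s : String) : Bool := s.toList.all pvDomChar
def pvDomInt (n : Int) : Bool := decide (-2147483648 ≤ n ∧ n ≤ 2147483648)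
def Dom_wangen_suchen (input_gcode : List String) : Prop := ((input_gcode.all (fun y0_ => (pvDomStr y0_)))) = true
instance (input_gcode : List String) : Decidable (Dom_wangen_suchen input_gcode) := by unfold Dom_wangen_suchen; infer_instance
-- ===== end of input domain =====

-- B replaces A's incremental flag-based single pass by a two-phase chunk-then-scan
-- decomposition (split into M00-terminated segments, then take each segment's suffix
-- from its first marker); same return value, objective: alternative decomposition.

-- ===== PORT A =====
-- state: (liste_wangen, wange, start); loop body transliterated branch for branch
def pvGoA : List String → List (List String) → List String → Int → List (List String)
  | [], liste, _, _ => liste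
  | i :: rest, liste, wange, start =>
    let start1 : Int :=
      if PySem.Str.isIn "(WANGENKONTOUR)" i || PySem.Str.isIn "(AUFG AUSSENK)" i then 1 else start
    let wange1 := if start1 == 1 then wange ++ [i] else wange
    if PySem.Str.isIn "M00" i then
      pvGoA rest (if wange1.length ≠ 0 then liste ++ [wange1] else liste) [] 0
    else
      pvGoA rest liste wange1 start1

def wangen_suchen (input_gcode : List String) : List (List String) :=
  pvGoA input_gcode [] [] 0

-- ===== PORT B =====
def pvIsMarker (l : String) : Bool :=
  PySem.Str.isIn "(WANGENKONTOUR)" l || PySem.Str.isIn "(AUFG AUSSENK)" l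

-- phase 1: consecutive segments, each ending at (and including) an "M00" line;
-- a trailing segment without "M00" is discarded
def pvSegments : List String → List String → List (List String)
  | [], _ => []
  | i :: rest, seg =>
    let seg' := seg ++ [i]
    if PySem.Str.isIn "M00" i then seg' :: pvSegments rest [] else pvSegments rest seg'

-- phase 2: per segment, the suffix from the first marker line (none if no marker)
def pvExtract (s : List String) : Option (List String) :=
  (s.findIdx? pvIsMarker).map (fun k => s.drop k)

def wangen_suchen_alt (input_gcode : List String) : List (List String) :=
  (pvSegments input_gcode []).filterMap pvExtract

-- ===== PRECONDITION & SPEC =====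
def Spec_wangen_suchen (input_gcode : List String) (out : List (List String)) : Prop := out = wangen_suchen_alt input_gcode
instance (input_gcode : List String) (out : List (List String)) : Decidable (Spec_wangen_suchen input_gcode out) := by unfold Spec_wangen_suchen; infer_instance

-- ===== CLAIM (what is proved, stated in full; the proofs are below) =====
def Claim_equal_wangen_suchen : Prop := ∀ (input_gcode : List String), Dom_wangen_suchen input_gcode → Spec_wangen_suchen input_gcode (wangen_suchen input_gcode)

-- ===== LEMMAS AND PROOFS =====

-- how the first-marker suffix of a partial segment evolves when a line is appended
lemma extract_append (seg : List String) (i : String) :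
    pvExtract (seg ++ [i]) =
      match pvExtract seg with
      | some w => some (w ++ [i])
      | none => if pvIsMarker i then some [i] else none := by
  unfold pvExtract
  rw [List.findIdx?_append]
  cases h : seg.findIdx? pvIsMarker with
  | none =>
    by_cases hm : pvIsMarker i <;>
      simp [hm, List.findIdx?_cons]
  | some k =>
    have hk : k < seg.length := (List.findIdx?_eq_some_iff_findIdx_eq.mp h).1
    simp [List.drop_append_of_le_length (Nat.le_of_lt hk)]

-- loop invariant: A's (wange, start) is determined by the first-marker suffix of
-- the current partial segment
lemma goA_eq (ls : List String) : ∀ (liste : List (List String)) (seg : List String),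
    pvGoA ls liste ((pvExtract seg).getD []) (if (pvExtract seg).isSome then 1 else 0)
      = liste ++ (pvSegments ls seg).filterMap pvExtract := by
  induction ls with
  | nil => intro liste seg; simp [pvGoA, pvSegments]
  | cons i rest ih =>
    intro liste seg
    have h0 : pvExtract ([] : List String) = none := by simp [pvExtract]
    simp only [pvGoA, pvSegments,
      show (PySem.Str.isIn "(WANGENKONTOUR)" i || PySem.Str.isIn "(AUFG AUSSENK)" i)
        = pvIsMarker i from rfl]
    by_cases hM : PySem.Str.isIn "M00" i
    · simp only [hM]
      cases hE : pvExtract seg with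
      | some w =>
        have hE' : pvExtract (seg ++ [i]) = some (w ++ [i]) := by rw [extract_append, hE]
        have t := ih (liste ++ [w ++ [i]]) []
        rw [h0] at t
        simp at t
        simp [hE', t]
      | none =>
        by_cases hm : pvIsMarker i
        · have hE' : pvExtract (seg ++ [i]) = some [i] := by
            rw [extract_append, hE]; simp [hm]
          have t := ih (liste ++ [[i]]) []
          rw [h0] at t
          simp at t
          simp [hm, hE', t]
        · have hE' : pvExtract (seg ++ [i]) = none := by
            rw [extract_append, hE]; simp [hm]
          have t := ih liste []
          rw [h0] at t
          simp at t
          simp [hm, hE', t]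
    · simp only [hM]
      cases hE : pvExtract seg with
      | some w =>
        have hE' : pvExtract (seg ++ [i]) = some (w ++ [i]) := by rw [extract_append, hE]
        have t := ih liste (seg ++ [i])
        rw [hE'] at t
        simp at t
        by_cases hm : pvIsMarker i <;> simp [hm, t]
      | none =>
        by_cases hm : pvIsMarker i
        · have hE' : pvExtract (seg ++ [i]) = some [i] := by
            rw [extract_append, hE]; simp [hm]
          have t := ih liste (seg ++ [i])
          rw [hE'] at t
          simp at t
          simp [hm, t]
        · have hE' : pvExtract (seg ++ [i]) = none := by
            rw [extract_append, hE]; simp [hm]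
          have t := ih liste (seg ++ [i])
          rw [hE'] at t
          simp at t
          simp [hm, t]

-- ===== VERDICT (by name: the statement is the Claim_ definition above) =====
theorem wangen_suchen_spec : Claim_equal_wangen_suchen := by
  intro ls _
  show wangen_suchen ls = wangen_suchen_alt ls
  unfold wangen_suchen wangen_suchen_alt
  have h0 : pvExtract ([] : List String) = none := by simp [pvExtract]
  have := goA_eq ls [] []
  rw [h0] at this
  simpa using this
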